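-- pv_equiv track=rewrite | github.com/PaddlePaddle/PaddleNLP | examples/machine_translation/text_simultaneous_translation/demo/demo.py | cut_line
-- ===== SOURCE A (Python) =====
-- def cut_line(str, line_len):
--     """
--     Wrap output
--     """
--     result = []
--     temp = []
--     for idx, item in enumerate(str.split()):
--         temp.append(item)
--         if (idx + 1) % line_len == 0:
--             result.append(' '.join(temp))
--             temp = []
--     if len(temp) != 0:
--         result.append(' '.join(temp))
--     return '\n'.join(result)
-- ===== SOURCE B (Python) =====
-- def cut_line(str, line_len):
--     """
--     Wrap output
--     """
--     words = str.split()
--     lines = []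
--     while words:
--         lines.append(' '.join(words[:line_len]))
--         words = words[line_len:]
--     return '\n'.join(lines)
-- ===== Notes on version B (the rewrite author's own statement) =====
-- stated objective: simpler
-- what changed: Replaces the enumerate/counter/modulo loop with a flush buffer by repeatedly slicing the next line_len words off the word list and joining each slice, so no index arithmetic or temp buffer is needed.
-- outside the precondition, e.g. on cut_line('a b c', -2): A returns 'a b\nc', B does not finish within the time limit; on cut_line('a', 0): A raises ZeroDivisionError, B does not finish within the time limit
import Mathlib
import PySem

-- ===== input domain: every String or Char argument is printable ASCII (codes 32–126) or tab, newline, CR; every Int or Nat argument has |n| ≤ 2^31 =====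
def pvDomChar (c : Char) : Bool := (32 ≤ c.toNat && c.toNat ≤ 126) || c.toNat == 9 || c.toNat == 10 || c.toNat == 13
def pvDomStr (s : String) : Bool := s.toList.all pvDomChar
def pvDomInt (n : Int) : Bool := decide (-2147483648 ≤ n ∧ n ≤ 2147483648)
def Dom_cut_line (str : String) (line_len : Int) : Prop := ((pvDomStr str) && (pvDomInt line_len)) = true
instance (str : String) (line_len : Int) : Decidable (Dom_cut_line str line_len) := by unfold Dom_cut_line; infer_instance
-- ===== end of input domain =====

-- B replaces A's counter/modulo flush loop with repeated take/drop slicing of line_len words; simpler decomposition, same cost.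
-- A mutates nothing; equivalence is about the return value on Pre_ (line_len ≥ 1, or a whitespace-only/empty str).

-- ===== PORT A =====
-- loop body of A's for-loop: state = (result, temp)
def stepA (line_len : Int) (st : List String × List String) (iw : Int × String) :
    List String × List String :=
  let temp := st.2 ++ [iw.2]
  if PySem.Int.mod (iw.1 + 1) line_len == 0 then
    (st.1 ++ [PySem.Str.join " " temp], [])
  else (st.1, temp)

def cut_line (str : String) (line_len : Int) : String :=
  let p := (PySem.List.enumerate (PySem.Str.split₀ str) 0).foldl (stepA line_len) ([], [])
  let result := if p.2.length ≠ 0 then p.1 ++ [PySem.Str.join " " p.2] else p.1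
  PySem.Str.join "\n" result

-- ===== PORT B =====
-- the while-loop of B: peel words[:line_len] off words until empty.
-- The 'line_len ≤ 0' disjunct only totalizes the recursion (the Python loop diverges there, outside Pre_).
def chunkLines (line_len : Int) (words : List String) : List String :=
  if words = [] ∨ line_len ≤ 0 then []
  else
    PySem.Str.join " " (PySem.List.slice words none (some line_len)) ::
      chunkLines line_len (PySem.List.slice words (some line_len) none)
termination_by words.length
decreasing_by
  rename_i h
  push Not at h
  rw [PySem.List.slice_from _ (by omega : (0:Int) ≤ line_len)]
  have : words.length ≠ 0 := fun hn => h.1 (List.eq_nil_of_length_eq_zero hn)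
  simp [List.length_drop]
  omega

def cut_line_alt (str : String) (line_len : Int) : String :=
  PySem.Str.join "\n" (chunkLines line_len (PySem.Str.split₀ str))

-- ===== PRECONDITION & SPEC =====
-- Pre_ excludes line_len ≤ 0 with at least one word: at line_len = 0 A raises ZeroDivisionError, and for
-- negative line_len A's grouping by |line_len| is an accident of Python's sign-of-divisor modulo that no
-- caller would specify (B's loop does not terminate there).
def Pre_cut_line (str : String) (line_len : Int) : Prop :=
  PySem.Str.split₀ str = [] ∨ 1 ≤ line_len
instance (str : String) (line_len : Int) : Decidable (Pre_cut_line str line_len) := by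
  unfold Pre_cut_line; infer_instance

def pvWitness_cut_line : String × Int := ("hello brave new world", 2)

def Spec_cut_line (str : String) (line_len : Int) (out : String) : Prop := out = cut_line_alt str line_len
instance (str : String) (line_len : Int) (out : String) : Decidable (Spec_cut_line str line_len out) := by
  unfold Spec_cut_line; infer_instance

-- ===== CLAIM (what is proved, stated in full; the proofs are below) =====
def Claim_equal_cut_line : Prop := ∀ (str : String) (line_len : Int), Dom_cut_line str line_len → Pre_cut_line str line_len → Spec_cut_line str line_len (cut_line str line_len)

-- ===== LEMMAS AND PROOFS =====

-- finalize of A's state after the loop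
def finA (st : List String × List String) : List String :=
  if st.2.length ≠ 0 then st.1 ++ [PySem.Str.join " " st.2] else st.1

theorem chunkLines_nil (k : Int) : chunkLines k [] = [] := by
  rw [chunkLines]; simp

theorem chunkLines_short (k : Int) (ws : List String) (hw : ws ≠ [])
    (hk : 1 ≤ k) (hlen : ws.length ≤ k.toNat) : chunkLines k ws = [PySem.Str.join " " ws] := by
  rw [chunkLines]
  rw [if_neg (by simp [hw]; omega)]
  rw [PySem.List.slice_to _ (by omega : (0:Int) ≤ k),
      PySem.List.slice_from _ (by omega : (0:Int) ≤ k)]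
  rw [List.take_of_length_le hlen, List.drop_eq_nil_of_le hlen, chunkLines_nil]

theorem chunkLines_cons (k : Int) (c ws : List String) (hk : 1 ≤ k)
    (hc : c.length = k.toNat) :
    chunkLines k (c ++ ws) = PySem.Str.join " " c :: chunkLines k ws := by
  rw [chunkLines]
  have hcne : c ≠ [] := by
    intro h; subst h; simp at hc; omega
  rw [if_neg (by simp [hcne]; omega)]
  rw [PySem.List.slice_to _ (by omega : (0:Int) ≤ k),
      PySem.List.slice_from _ (by omega : (0:Int) ≤ k)]
  rw [← hc, List.take_left, List.drop_left]

-- A's loop, from an index n that has temp.length ≡ n (mod k), computes B's chunking of temp ++ ws.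
theorem loopA_eq_chunks (k : Int) (hk : 1 ≤ k) (ws : List String) :
    ∀ (n : Nat) (temp result : List String),
      temp.length < k.toNat → n % k.toNat = temp.length →
      finA ((PySem.List.enumerate ws (n : Int)).foldl (stepA k) (result, temp)) =
        result ++ chunkLines k (temp ++ ws) := by
  induction ws with
  | nil =>
    intro n temp result hlt hmod
    simp only [PySem.List.enumerate_nil, List.foldl_nil, List.append_nil]
    by_cases h : temp = []
    · subst h; simp [finA, chunkLines_nil]
    · rw [finA, if_pos (by simp [h]),
        chunkLines_short k temp h hk (by omega)]
  | cons w ws ih =>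
    intro n temp result hlt hmod
    have hkN : 0 < k.toNat := by omega
    have hkcast : ((k.toNat : Int)) = k := Int.toNat_of_nonneg (by omega)
    rw [PySem.List.enumerate_cons, List.foldl_cons]
    have hmodeq : PySem.Int.mod ((n : Int) + 1) k = (((n + 1) % k.toNat : Nat) : Int) := by
      rw [PySem.Int.mod_eq_emod_of_pos (by omega : (0:Int) < k), ← hkcast]
      push_cast
      rfl
    have hcast1 : ((n : Int) + 1) = (((n + 1 : Nat)) : Int) := by push_cast; ring
    have hstep : (n + 1) % k.toNat = (temp.length + 1) % k.toNat := by
      rw [← hmod, Nat.mod_add_mod]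
    by_cases hfull : temp.length + 1 = k.toNat
    · have hc : ((n + 1) % k.toNat : Nat) = 0 := by
        rw [hstep, hfull, Nat.mod_self]
      have hs : stepA k (result, temp) ((n : Int), w) =
          (result ++ [PySem.Str.join " " (temp ++ [w])], []) := by
        simp [stepA, hmodeq, hc]
      rw [hs, hcast1, ih (n + 1) [] (result ++ [PySem.Str.join " " (temp ++ [w])]) (by simp; omega)
        (by simpa using hc)]
      rw [show temp ++ w :: ws = (temp ++ [w]) ++ ws by simp,
        chunkLines_cons k (temp ++ [w]) ws hk (by simp; omega)]
      simp
    · have hc : ((n + 1) % k.toNat : Nat) = temp.length + 1 := by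
        rw [hstep, Nat.mod_eq_of_lt (by omega)]
      have hs : stepA k (result, temp) ((n : Int), w) = (result, temp ++ [w]) := by
        simp [stepA, hmodeq, hc]
        omega
      rw [hs, hcast1, ih (n + 1) (temp ++ [w]) result (by simp; omega) (by simp [hc])]
      simp

-- ===== VERDICT (by name: the statement is the Claim_ definition above) =====
theorem cut_line_spec : Claim_equal_cut_line := by
  intro str line_len _ hpre
  unfold Spec_cut_line cut_line cut_line_alt
  rcases hpre with hnil | hk
  · rw [hnil]
    show PySem.Str.join "\n"
        (finA ((PySem.List.enumerate ([] : List String) 0).foldl (stepA line_len) ([], []))) = _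
    simp [PySem.List.enumerate_nil, finA, chunkLines_nil]
  · have h := loopA_eq_chunks line_len hk (PySem.Str.split₀ str) 0 [] []
      (by simp; omega) (by simp)
    simp only [Nat.cast_zero, List.nil_append] at h
    show PySem.Str.join "\n"
        (finA ((PySem.List.enumerate (PySem.Str.split₀ str) 0).foldl (stepA line_len) ([], []))) = _
    rw [h]
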